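-- pv_equiv track=rewrite | github.com/nathanzhu144/practices | monotonic/1425_const_subseq_sum.py | constrainedSubsetSumTLE
-- ===== SOURCE A (Python) =====
-- def constrainedSubsetSumTLE(nums, k):
--     N = len(nums)
--     dp = nums[:]
--
--     for i in range(N):
--         for j in range(1, k + 1):
--             if i - j < 0: break
--             dp[i] = max(dp[i], dp[i - j] + nums[i])
--
--     return max(dp)
-- ===== SOURCE B (Python) =====
-- def constrainedSubsetSumTLE(nums, k):
--     # O(N) monotonic-queue DP: dp[i] = nums[i] + max(0, max(dp[i-k:i])),
--     # with dq holding indices of dp in strictly decreasing dp-value order.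
--     dp = []
--     dq = []
--     for i, x in enumerate(nums):
--         while dq and dq[0] < i - k:
--             dq.pop(0)
--         w = dp[dq[0]] if dq else 0
--         cur = x + (w if w > 0 else 0)
--         while dq and dp[dq[-1]] <= cur:
--             dq.pop()
--         dq.append(i)
--         dp.append(cur)
--     return max(dp)
-- ===== Notes on version B (the rewrite author's own statement) =====
-- stated objective: faster
-- what changed: Replaces A's O(N*k) inner scan (for each i, try all gaps j=1..k) by a single-pass DP with a monotonic queue that maintains the sliding-window maximum of dp over the last k positions.
import Mathlib
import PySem

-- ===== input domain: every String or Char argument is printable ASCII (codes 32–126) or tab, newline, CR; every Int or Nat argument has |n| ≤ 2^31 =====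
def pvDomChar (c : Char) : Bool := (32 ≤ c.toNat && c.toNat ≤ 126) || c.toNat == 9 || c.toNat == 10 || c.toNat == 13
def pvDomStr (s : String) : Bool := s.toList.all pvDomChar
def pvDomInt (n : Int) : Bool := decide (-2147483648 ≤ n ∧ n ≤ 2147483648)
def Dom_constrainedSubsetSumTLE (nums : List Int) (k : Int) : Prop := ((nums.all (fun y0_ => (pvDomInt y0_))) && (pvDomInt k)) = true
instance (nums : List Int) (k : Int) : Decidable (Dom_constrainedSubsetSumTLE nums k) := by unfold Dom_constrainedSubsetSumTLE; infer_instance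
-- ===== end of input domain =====

-- B replaces A's O(N*k) per-index gap scan by a one-pass monotonic-queue DP (sliding-window maximum); equivalence of return values is proved on nonempty input lists.


-- ===== PORT A =====
-- inner 'for j in range(1, k+1)' with the 'if i - j < 0: break' folded into the guard
def pvInnerA (nums : List Int) (k : Int) (i : Nat) (dp : List Int) (j : Nat) : List Int :=
  if (j : Int) ≤ k then
    if h2 : (i : Int) - (j : Int) < 0 then dp
    else pvInnerA nums k i
      (PySem.List.pySetD dp (i : Int) (max (PySem.List.pyGetD dp (i : Int) 0)
        (PySem.List.pyGetD dp ((i : Int) - (j : Int)) 0 + PySem.List.pyGetD nums (i : Int) 0))) (j + 1)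
  else dp
termination_by i + 1 - j
decreasing_by omega

def constrainedSubsetSumTLE (nums : List Int) (k : Int) : Int :=
  let N := nums.length
  let dp := (List.range N).foldl (fun dp i => pvInnerA nums k i dp 1) nums
  (PySem.List.max? dp (fun y => y)).getD 0   -- max(dp); Pre_ excludes the empty list, where Python raises

-- ===== PORT B =====
-- 'while dq and dp[dq[-1]] <= cur: dq.pop()'  — remove the trailing run satisfying p
def pvPopBackWhile (p : Int → Bool) : List Int → List Int
  | [] => []
  | a :: rest =>
    match pvPopBackWhile p rest with
    | [] => if p a then [] else [a]
    | r => a :: r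

def constrainedSubsetSumTLE_alt (nums : List Int) (k : Int) : Int :=
  let st := (PySem.List.enumerate nums 0).foldl
    (fun (st : List Int × List Int) ix =>
      let dq1 := st.1.dropWhile (fun t => decide (t < ix.1 - k))     -- while dq and dq[0] < i - k: dq.pop(0)
      let w : Int := match dq1 with
        | [] => 0
        | t :: _ => PySem.List.pyGetD st.2 t 0                        -- dp[dq[0]] if dq else 0
      let cur := ix.2 + (if 0 < w then w else 0)
      let dq2 := pvPopBackWhile (fun t => decide (PySem.List.pyGetD st.2 t 0 ≤ cur)) dq1
      (dq2 ++ [ix.1], st.2 ++ [cur]))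
    ([], [])
  (PySem.List.max? st.2 (fun y => y)).getD 0   -- max(dp); Pre_ excludes the empty list, where Python raises

-- ===== PRECONDITION & SPEC =====
-- Pre_ excludes only the empty list, on which Python's max([]) raises ValueError (in both A and B).
def Pre_constrainedSubsetSumTLE (nums : List Int) (k : Int) : Prop := nums ≠ []
instance (nums : List Int) (k : Int) : Decidable (Pre_constrainedSubsetSumTLE nums k) := by
  unfold Pre_constrainedSubsetSumTLE; infer_instance
def pvWitness_constrainedSubsetSumTLE : List Int × Int := ([1, -2, 3], 2)

def Spec_constrainedSubsetSumTLE (nums : List Int) (k : Int) (out : Int) : Prop := out = constrainedSubsetSumTLE_alt nums k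
instance (nums : List Int) (k : Int) (out : Int) : Decidable (Spec_constrainedSubsetSumTLE nums k out) := by unfold Spec_constrainedSubsetSumTLE; infer_instance

-- ===== CLAIM (what is proved, stated in full; the proofs are below) =====
def Claim_equal_constrainedSubsetSumTLE : Prop := ∀ (nums : List Int) (k : Int), Dom_constrainedSubsetSumTLE nums k → Pre_constrainedSubsetSumTLE nums k → Spec_constrainedSubsetSumTLE nums k (constrainedSubsetSumTLE nums k)

-- ===== LEMMAS AND PROOFS =====

-- window index list for position m: the t < m with m - t ≤ k
def pvWlist (k : Int) (m : Nat) : List Nat :=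
  (List.range m).filter (fun t => decide ((m : Int) - (t : Int) ≤ k))

-- the DP table (dp[0..m-1]) both programs compute
def pvDList (nums : List Int) (k : Int) : Nat → List Int
  | 0 => []
  | m + 1 =>
    let dp := pvDList nums k m
    dp ++ [nums.getD m 0 + max 0 (((pvWlist k m).map (fun t => dp.getD t 0)).foldl max 0)]

-- dp[m]
def pvD (nums : List Int) (k : Int) (m : Nat) : Int :=
  nums.getD m 0 + max 0 (((pvWlist k m).map (fun t => (pvDList nums k m).getD t 0)).foldl max 0)

-- gap list A's inner loop still has to scan, starting at gap j
def pvJlist (k : Int) (m j : Nat) : List Nat :=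
  List.range' j ((min k (m : Int) - (j : Int) + 1).toNat)

-- "t is a right-to-left record among dp[t..m-1]"
def pvRecB (nums : List Int) (k : Int) (m t : Nat) : Bool :=
  (List.range m).all (fun s => decide (s ≤ t) || decide (pvD nums k s < pvD nums k t))

-- the monotonic queue contents after m iterations of B's loop
def pvDq (nums : List Int) (k : Int) (m : Nat) : List Nat :=
  (List.range m).filter
    (fun t => (decide ((m : Int) - 1 - k ≤ (t : Int)) || decide (t = m - 1)) && pvRecB nums k m t)

lemma length_pvDList (nums : List Int) (k : Int) (m : Nat) : (pvDList nums k m).length = m := by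
  induction m with
  | zero => rfl
  | succ m ih => simp [pvDList, ih]

lemma pvDList_succ (nums : List Int) (k : Int) (m : Nat) :
    pvDList nums k (m + 1) = pvDList nums k m ++ [pvD nums k m] := by
  rfl

lemma pvDList_getD (nums : List Int) (k : Int) {m t : Nat} (ht : t < m) :
    (pvDList nums k m).getD t 0 = pvD nums k t := by
  induction m with
  | zero => omega
  | succ m ih =>
    rw [pvDList_succ]
    rcases Nat.lt_or_ge t m with h | h
    · rw [List.getD_append _ _ _ _ (by rw [length_pvDList]; exact h)]
      exact ih h
    · have ht' : t = m := by omega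
      subst ht'
      rw [List.getD_eq_getElem?_getD, List.getElem?_append_right (by rw [length_pvDList])]
      simp [length_pvDList]

lemma mem_pvWlist {k : Int} {m t : Nat} : t ∈ pvWlist k m ↔ t < m ∧ (m : Int) - (t : Int) ≤ k := by
  simp [pvWlist, List.mem_filter, List.mem_range]

lemma mem_pvJlist {k : Int} {m j jj : Nat} :
    jj ∈ pvJlist k m j ↔ j ≤ jj ∧ (jj : Int) ≤ min k (m : Int) := by
  rw [pvJlist, List.mem_range'_1]
  omega

lemma foldl_max_le {l : List Int} {c b : Int} (hc : c ≤ b) (h : ∀ a ∈ l, a ≤ b) :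
    l.foldl max c ≤ b := by
  induction l generalizing c with
  | nil => exact hc
  | cons a l ih =>
    exact ih (by simp [hc, h a (by simp)] ) (fun x hx => h x (by simp [hx]))

-- dp[m] written with the window max M; M is nonnegative
lemma pvD_eq (nums : List Int) (k : Int) (m : Nat) :
    pvD nums k m = nums.getD m 0 + ((pvWlist k m).map (pvD nums k)).foldl max 0 := by
  conv_lhs => rw [pvD]
  rw [List.map_congr_left (fun t ht => pvDList_getD nums k (mem_pvWlist.mp ht).1)]
  have h0 := (PySem.List.le_foldl_max ((pvWlist k m).map (pvD nums k)) 0).1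
  change nums.getD m 0 + max 0 (((pvWlist k m).map (pvD nums k)).foldl max 0) = _
  omega

lemma wmax_nonneg (nums : List Int) (k : Int) (m : Nat) :
    0 ≤ ((pvWlist k m).map (pvD nums k)).foldl max 0 :=
  (PySem.List.le_foldl_max ((pvWlist k m).map (pvD nums k)) 0).1

-- == A side ==

lemma innerA_spec (nums : List Int) (k : Int) (m : Nat) :
    ∀ (j : Nat) (dp : List Int), 1 ≤ j → m < dp.length →
      pvInnerA nums k m dp j =
        dp.set m (((pvJlist k m j).map (fun jj => dp.getD (m - jj) 0 + nums.getD m 0)).foldl max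
          (dp.getD m 0)) := by
  intro j dp hj hm
  induction hfuel : m + 1 - j using Nat.strong_induction_on generalizing j dp with
  | _ fuel ih =>
  rw [pvInnerA]
  by_cases hk : (j : Int) ≤ k
  · by_cases hneg : (m : Int) - (j : Int) < 0
    · -- break: j > m, the gap list is empty
      rw [if_pos hk, dif_pos hneg]
      have hempty : pvJlist k m j = [] := by
        unfold pvJlist
        have : (min k (m : Int) - (j : Int) + 1).toNat = 0 := by omega
        rw [this, List.range'_zero]
      rw [hempty]
      simp only [List.map_nil, List.foldl_nil]
      rw [List.getD_eq_getElem _ _ hm]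
      exact (List.set_getElem_self hm).symm
    · rw [if_pos hk, dif_neg hneg]
      have hjm : j ≤ m := by omega
      set v := max (PySem.List.pyGetD dp (m : Int) 0)
        (PySem.List.pyGetD dp ((m : Int) - (j : Int)) 0 + PySem.List.pyGetD nums (m : Int) 0) with hv
      have hset : PySem.List.pySetD dp (m : Int) v = dp.set m v := PySem.List.pySetD_natCast dp m v
      rw [hset]
      have hm' : m < (dp.set m v).length := by simpa using hm
      rw [ih (m + 1 - (j + 1)) (by omega) (j + 1) (dp.set m v) (by omega) hm' rfl]
      -- rewrite the gap list on the left
      have hcons : pvJlist k m j = j :: pvJlist k m (j + 1) := by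
        unfold pvJlist
        have h1 : (min k (m : Int) - (j : Int) + 1).toNat
            = (min k (m : Int) - ((j : Nat) + 1 : Nat) + 1).toNat + 1 := by
          push_cast; omega
        rw [h1, List.range'_succ]
      rw [hcons]
      have hgd : ∀ t : Nat, t ≠ m → (dp.set m v).getD t 0 = dp.getD t 0 := by
        intro t ht
        simp [List.getD_eq_getElem?_getD, List.getElem?_set_ne (by omega : m ≠ t)]
      have hmap : (pvJlist k m (j + 1)).map (fun jj => (dp.set m v).getD (m - jj) 0 + nums.getD m 0)
          = (pvJlist k m (j + 1)).map (fun jj => dp.getD (m - jj) 0 + nums.getD m 0) := by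
        apply List.map_congr_left
        intro jj hjj
        have hb := mem_pvJlist.mp hjj
        have : m - jj ≠ m := by omega
        rw [hgd _ this]
      rw [hmap, List.set_set]
      congr 1
      simp only [List.map_cons, List.foldl_cons]
      congr 1
      -- initial accumulator: (dp.set m v).getD m 0 = v = max (dp.getD m 0) (dp.getD (m-j) 0 + nums.getD m 0)
      have hvm : (dp.set m v).getD m 0 = v := by
        simp [List.getD_eq_getElem?_getD, hm]
      rw [hvm, hv]
      have e1 : PySem.List.pyGetD dp (m : Int) 0 = dp.getD m 0 := PySem.List.pyGetD_natCast dp m 0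
      have e2 : PySem.List.pyGetD nums (m : Int) 0 = nums.getD m 0 := PySem.List.pyGetD_natCast nums m 0
      have e3 : PySem.List.pyGetD dp ((m : Int) - (j : Int)) 0 = dp.getD (m - j) 0 := by
        have : (m : Int) - (j : Int) = ((m - j : Nat) : Int) := by push_cast; omega
        rw [this]; exact PySem.List.pyGetD_natCast dp (m - j) 0
      rw [e1, e2, e3]
  · rw [if_neg hk]
    have hempty : pvJlist k m j = [] := by
      unfold pvJlist
      have : (min k (m : Int) - (j : Int) + 1).toNat = 0 := by omega
      rw [this, List.range'_zero]
    rw [hempty]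
    simp only [List.map_nil, List.foldl_nil]
    rw [List.getD_eq_getElem _ _ hm]
    exact (List.set_getElem_self hm).symm

-- A's scan of all gaps computes x + window-max
lemma gapScan_eq (nums : List Int) (k : Int) (m : Nat) (D : Nat → Int) :
    ((pvJlist k m 1).map (fun jj => D (m - jj) + nums.getD m 0)).foldl max (nums.getD m 0)
      = nums.getD m 0 + ((pvWlist k m).map D).foldl max 0 := by
  set x := nums.getD m 0 with hx
  set M := ((pvWlist k m).map D).foldl max 0 with hM
  have hM0 : 0 ≤ M := (PySem.List.le_foldl_max _ 0).1
  apply le_antisymm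
  · apply foldl_max_le (by omega)
    intro a ha
    rcases List.mem_map.mp ha with ⟨jj, hjj, rfl⟩
    have hb := mem_pvJlist.mp hjj
    have hw : (m - jj) ∈ pvWlist k m := by
      apply mem_pvWlist.mpr
      constructor
      · omega
      · have : ((m - jj : Nat) : Int) = (m : Int) - (jj : Int) := by omega
        omega
    have : D (m - jj) ≤ M := (PySem.List.le_foldl_max _ 0).2 _ (List.mem_map_of_mem hw)
    omega
  · rcases PySem.List.foldl_max_mem ((pvWlist k m).map D) 0 with h0 | hmem
    · rw [← hM] at h0
      rw [h0]
      simpa using (PySem.List.le_foldl_max ((pvJlist k m 1).map (fun jj => D (m - jj) + x)) x).1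
    · rw [← hM] at hmem
      rcases List.mem_map.mp hmem with ⟨t, ht, hDt⟩
      have hw := mem_pvWlist.mp ht
      have hjj : (m - t) ∈ pvJlist k m 1 := by
        apply mem_pvJlist.mpr
        constructor
        · omega
        · have : ((m - t : Nat) : Int) = (m : Int) - (t : Int) := by omega
          omega
      have : D (m - (m - t)) + x ≤ ((pvJlist k m 1).map (fun jj => D (m - jj) + x)).foldl max x :=
        (PySem.List.le_foldl_max _ x).2 _ (List.mem_map_of_mem hjj)
      have ht' : m - (m - t) = t := by omega
      rw [ht'] at this
      omega

lemma outerA (nums : List Int) (k : Int) :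
    ∀ m, m ≤ nums.length →
      (List.range m).foldl (fun dp i => pvInnerA nums k i dp 1) nums
        = pvDList nums k m ++ nums.drop m := by
  intro m hm
  induction m with
  | zero => simp [pvDList]
  | succ m ih =>
    rw [List.range_succ, List.foldl_append]
    rw [ih (by omega)]
    simp only [List.foldl_cons, List.foldl_nil]
    set dp := pvDList nums k m ++ nums.drop m with hdp
    have hlen1 : (pvDList nums k m).length = m := length_pvDList nums k m
    have hlen : dp.length = nums.length := by
      simp [hdp, hlen1]; omega
    have hmlt : m < dp.length := by omega
    rw [innerA_spec nums k m 1 dp (by omega) hmlt]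
    -- the accumulator starts at nums[m]
    have hgdm : dp.getD m 0 = nums.getD m 0 := by
      rw [hdp, List.getD_eq_getElem?_getD, List.getElem?_append_right (by omega), hlen1]
      simp [List.getElem?_drop, List.getD_eq_getElem?_getD]
    -- earlier entries are finished dp values
    have hmap : (pvJlist k m 1).map (fun jj => dp.getD (m - jj) 0 + nums.getD m 0)
        = (pvJlist k m 1).map (fun jj => pvD nums k (m - jj) + nums.getD m 0) := by
      apply List.map_congr_left
      intro jj hjj
      have hb := mem_pvJlist.mp hjj
      have hlt : m - jj < m := by omega
      rw [hdp, List.getD_append _ _ _ _ (by omega), pvDList_getD nums k hlt]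
    rw [hgdm, hmap]
    have := gapScan_eq nums k m (pvD nums k)
    simp only at this
    rw [this, ← pvD_eq]
    -- set at position m turns the suffix head into pvD m
    have hdrop : nums.drop m = nums[m] :: nums.drop (m + 1) := List.drop_eq_getElem_cons (by omega)
    rw [hdp, hdrop, pvDList_succ]
    rw [List.set_append_right _ _ (by omega), hlen1]
    simp only [Nat.sub_self]
    simp only [List.append_assoc, List.cons_append, List.nil_append]
    congr 1

-- == B side ==

lemma pvRecB_iff {nums : List Int} {k : Int} {m t : Nat} :
    pvRecB nums k m t = true ↔ ∀ s, t < s → s < m → pvD nums k s < pvD nums k t := by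
  unfold pvRecB
  rw [List.all_eq_true]
  constructor
  · intro h s hts hsm
    have := h s (List.mem_range.mpr hsm)
    simp at this
    rcases this with h1 | h2
    · omega
    · exact h2
  · intro h s hs
    simp
    rcases Nat.lt_or_ge t s with h1 | h1
    · exact Or.inr (h s h1 (List.mem_range.mp hs))
    · exact Or.inl h1

lemma dropWhile_lt_eq_filter (c : Int) :
    ∀ (l : List Int), l.Pairwise (· < ·) →
      l.dropWhile (fun t => decide (t < c)) = l.filter (fun t => decide (c ≤ t)) := by
  intro l hl
  induction l with
  | nil => rfl
  | cons a l ih =>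
    rcases List.pairwise_cons.mp hl with ⟨ha, hl'⟩
    by_cases hac : a < c
    · rw [List.dropWhile_cons_of_pos (by simpa using hac),
        List.filter_cons_of_neg (by simpa using hac)]
      exact ih hl'
    · rw [List.dropWhile_cons_of_neg (by simpa using hac),
        List.filter_cons_of_pos (by simpa using not_lt.mp hac)]
      congr 1
      symm
      apply List.filter_eq_self.mpr
      intro b hb
      have := ha b hb
      simp; omega

lemma popBackWhile_eq_filter (p : Int → Bool) :
    ∀ (l : List Int), l.Pairwise (fun a b => p a = true → p b = true) →
      pvPopBackWhile p l = l.filter (fun t => ! p t) := by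
  intro l hl
  induction l with
  | nil => rfl
  | cons a l ih =>
    rcases List.pairwise_cons.mp hl with ⟨ha, hl'⟩
    rw [pvPopBackWhile, ih hl']
    rcases hrest : l.filter (fun t => ! p t) with _ | ⟨b, r⟩
    · by_cases hpa : p a = true
      · simp [hpa, List.filter_cons, hrest]
      · simp [hpa, List.filter_cons, hrest]
    · have hb : b ∈ l.filter (fun t => ! p t) := by rw [hrest]; exact List.mem_cons_self
      have hbl := List.mem_filter.mp hb
      have hpa : ¬ p a = true := by
        intro hpa
        have := ha b hbl.1 hpa
        simp [this] at hbl
      simp [hpa, List.filter_cons, hrest]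

-- queue after the front pops of iteration m
def pvDqW (nums : List Int) (k : Int) (m : Nat) : List Nat :=
  (List.range m).filter (fun t => decide ((m : Int) - k ≤ (t : Int)) && pvRecB nums k m t)

lemma pvDq_pairwise (nums : List Int) (k : Int) (m : Nat) : (pvDq nums k m).Pairwise (· < ·) :=
  List.pairwise_lt_range.filter _

lemma dropWhile_pvDq (nums : List Int) (k : Int) (m : Nat) :
    ((pvDq nums k m).map (fun t : Nat => (t : Int))).dropWhile (fun t => decide (t < (m : Int) - k))
      = (pvDqW nums k m).map (fun t : Nat => (t : Int)) := by
  have hpw : ((pvDq nums k m).map (fun t : Nat => (t : Int))).Pairwise (· < ·) :=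
    (pvDq_pairwise nums k m).map _ (by intro a b h; exact_mod_cast h)
  rw [dropWhile_lt_eq_filter _ _ hpw, List.filter_map]
  unfold pvDq pvDqW
  rw [List.filter_filter]
  apply congrArg (List.map _)
  apply List.filter_congr
  intro t ht
  have htm := List.mem_range.mp ht
  simp only [Function.comp_apply]
  by_cases h1 : (m : Int) - k ≤ (t : Int)
  · have h2 : (m : Int) - 1 - k ≤ (t : Int) := by omega
    simp [h1, h2]
  · simp [h1]

-- the head of the queue majorises the whole window
lemma headMax (nums : List Int) (k : Int) (m t0 : Nat) (rest : List Nat)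
    (hne : pvDqW nums k m = t0 :: rest) :
    ∀ t, t < m → (m : Int) - k ≤ (t : Int) → pvD nums k t ≤ pvD nums k t0 := by
  have hmem0 : t0 ∈ pvDqW nums k m := by rw [hne]; exact List.mem_cons_self
  have h0 := List.mem_filter.mp hmem0
  have h0r := List.mem_range.mp h0.1
  have h0p := h0.2
  rw [Bool.and_eq_true] at h0p
  have hrec0 := pvRecB_iff.mp h0p.2
  have hsorted : (pvDqW nums k m).Pairwise (· < ·) := List.pairwise_lt_range.filter _
  have hmin : ∀ t, t ∈ pvDqW nums k m → t0 ≤ t := by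
    intro t htq
    rw [hne] at htq hsorted
    rcases List.mem_cons.mp htq with rfl | htq
    · exact le_refl _
    · exact le_of_lt ((List.pairwise_cons.mp hsorted).1 t htq)
  intro t
  induction hfuel : m - t using Nat.strong_induction_on generalizing t with
  | _ fuel ih =>
  intro htm hwin
  rcases lt_trichotomy t t0 with hlt | rfl | hgt
  · -- t is below the queue head, so t is not a record: pass to a later witness
    have hnot : t ∉ pvDqW nums k m := by
      intro hIn
      have := hmin t hIn
      omega
    have hnr : ¬ pvRecB nums k m t = true := by
      intro hr
      exact hnot (List.mem_filter.mpr ⟨List.mem_range.mpr htm, by simp [hwin, hr]⟩)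
    rw [pvRecB_iff] at hnr
    push_neg at hnr
    rcases hnr with ⟨s, hts, hsm, hds⟩
    have hstep := ih (m - s) (by omega) s (by omega) (by omega) (by push_cast; omega)
    omega
  · exact le_refl _
  · exact le_of_lt (hrec0 t hgt htm)

-- the value B computes at iteration m is dp[m]
lemma curVal (nums : List Int) (k : Int) (m : Nat) (hm : m < nums.length) :
    (nums.getD m 0 +
        (if 0 < (match (pvDqW nums k m).map (fun t : Nat => (t : Int)) with
                  | [] => (0 : Int)
                  | t :: _ => PySem.List.pyGetD (pvDList nums k m) t 0)
         then (match (pvDqW nums k m).map (fun t : Nat => (t : Int)) with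
                  | [] => (0 : Int)
                  | t :: _ => PySem.List.pyGetD (pvDList nums k m) t 0)
         else 0))
      = pvD nums k m := by
  rcases hq : pvDqW nums k m with _ | ⟨t0, rest⟩
  · -- empty queue: the window itself is empty
    have hwl : pvWlist k m = [] := by
      rcases hwl : pvWlist k m with _ | ⟨t, ts⟩
      · rfl
      · exfalso
        have htW : t ∈ pvWlist k m := by rw [hwl]; exact List.mem_cons_self
        have ht := mem_pvWlist.mp htW
        have hm1 : m - 1 ∈ pvDqW nums k m := by
          apply List.mem_filter.mpr
          refine ⟨List.mem_range.mpr (by omega), ?_⟩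
          rw [Bool.and_eq_true]
          constructor
          · have : ((m - 1 : Nat) : Int) = (m : Int) - 1 := by omega
            simp only [decide_eq_true_eq]
            omega
          · rw [pvRecB_iff]
            intro s hs hsm
            omega
        rw [hq] at hm1
        exact (List.not_mem_nil) hm1
    simp only [List.map_nil]
    rw [pvD_eq, hwl]
    simp
  · simp only [List.map_cons]
    have h0 := List.mem_filter.mp (by rw [hq]; exact List.mem_cons_self : t0 ∈ pvDqW nums k m)
    have h0r := List.mem_range.mp h0.1
    have h0p := h0.2
    rw [Bool.and_eq_true] at h0p
    have h0w : (m : Int) - k ≤ (t0 : Int) := by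
      have := h0p.1; simp only [decide_eq_true_eq] at this; exact this
    have hw : PySem.List.pyGetD (pvDList nums k m) ((t0 : Nat) : Int) 0 = pvD nums k t0 := by
      rw [PySem.List.pyGetD_natCast, pvDList_getD nums k h0r]
    set M := ((pvWlist k m).map (pvD nums k)).foldl max 0 with hM
    have hM0 : 0 ≤ M := wmax_nonneg nums k m
    have hMle : M ≤ max 0 (pvD nums k t0) := by
      apply foldl_max_le (by simp)
      intro a ha
      rcases List.mem_map.mp ha with ⟨t, htW, rfl⟩
      have ht := mem_pvWlist.mp htW
      have := headMax nums k m t0 rest hq t ht.1 (by omega)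
      simp only [le_max_iff]
      omega
    have hDle : pvD nums k t0 ≤ M := by
      apply (PySem.List.le_foldl_max _ 0).2
      apply List.mem_map_of_mem
      apply mem_pvWlist.mpr
      exact ⟨h0r, by omega⟩
    rw [pvD_eq, ← hM, hw]
    by_cases hpos : 0 < pvD nums k t0
    · rw [if_pos hpos]
      have : pvD nums k t0 = M := by
        rcases max_choice 0 (pvD nums k t0) with h | h <;> omega
      omega
    · rw [if_neg hpos]
      have : M = 0 := by
        rcases max_choice 0 (pvD nums k t0) with h | h <;> omega
      omega

lemma pvRecB_succ (nums : List Int) (k : Int) {m t : Nat} (htm : t < m) :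
    pvRecB nums k (m + 1) t = (pvRecB nums k m t && decide (pvD nums k m < pvD nums k t)) := by
  apply Bool.eq_iff_iff.mpr
  rw [Bool.and_eq_true, pvRecB_iff, pvRecB_iff]
  simp only [decide_eq_true_eq]
  constructor
  · intro h
    exact ⟨fun s hs hsm => h s hs (by omega), h m htm (by omega)⟩
  · rintro ⟨h1, h2⟩ s hs hsm
    rcases Nat.lt_or_ge s m with h | h
    · exact h1 s hs h
    · have : s = m := by omega
      subst this; exact h2

lemma stepB (nums : List Int) (k : Int) (m : Nat) (hm : m < nums.length) :
    (fun (st : List Int × List Int) (ix : Int × Int) =>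
      let dq1 := st.1.dropWhile (fun t => decide (t < ix.1 - k))
      let w : Int := match dq1 with
        | [] => 0
        | t :: _ => PySem.List.pyGetD st.2 t 0
      let cur := ix.2 + (if 0 < w then w else 0)
      let dq2 := pvPopBackWhile (fun t => decide (PySem.List.pyGetD st.2 t 0 ≤ cur)) dq1
      (dq2 ++ [ix.1], st.2 ++ [cur]))
      ((pvDq nums k m).map (fun t : Nat => (t : Int)), pvDList nums k m) ((m : Int), nums.getD m 0)
    = ((pvDq nums k (m + 1)).map (fun t : Nat => (t : Int)), pvDList nums k (m + 1)) := by
  dsimp only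
  rw [dropWhile_pvDq]
  rw [curVal nums k m hm]
  rw [Prod.mk.injEq]
  refine ⟨?_, (pvDList_succ nums k m).symm⟩
  -- the queue after the value pops, as a filter
  have hPW : (pvDqW nums k m).Pairwise
      (fun a b : Nat => (decide (PySem.List.pyGetD (pvDList nums k m) ((a : Nat) : Int) 0 ≤ pvD nums k m) = true →
        decide (PySem.List.pyGetD (pvDList nums k m) ((b : Nat) : Int) 0 ≤ pvD nums k m) = true)) := by
    apply (List.pairwise_lt_range.filter _).imp_of_mem
    intro a b ha hb hab hpa
    have hma := List.mem_range.mp (List.mem_filter.mp ha).1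
    have hmb := List.mem_range.mp (List.mem_filter.mp hb).1
    have hpred := (List.mem_filter.mp ha).2
    rw [Bool.and_eq_true] at hpred
    have hreca := pvRecB_iff.mp hpred.2
    have hba : pvD nums k b < pvD nums k a := hreca b hab hmb
    rw [PySem.List.pyGetD_natCast, pvDList_getD nums k hma, decide_eq_true_eq] at hpa
    rw [PySem.List.pyGetD_natCast, pvDList_getD nums k hmb, decide_eq_true_eq]
    omega
  rw [popBackWhile_eq_filter _ _ (hPW.map _ (fun a b h => h))]
  rw [List.filter_map]
  have hsplit : pvDq nums k (m + 1)
      = (pvDqW nums k m).filter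
          ((fun t => !decide (PySem.List.pyGetD (pvDList nums k m) t 0 ≤ pvD nums k m)) ∘ (fun t : Nat => (t : Int)))
        ++ [m] := by
    -- pvDq (m+1) splits into the survivors and the new index m
    unfold pvDq pvDqW
    rw [List.range_succ, List.filter_append, List.filter_filter]
    congr 1
    · apply List.filter_congr
      intro t ht
      have htm := List.mem_range.mp ht
      rw [pvRecB_succ nums k htm]
      have e1 : (((m + 1 : Nat) : Int) - 1 - k) = (m : Int) - k := by push_cast; ring
      rw [e1]
      have e2 : ¬ (t = m + 1 - 1) := by omega
      simp only [Function.comp_apply, PySem.List.pyGetD_natCast, List.getD_eq_getElem?_getD]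
      rw [show (pvDList nums k m)[t]?.getD 0 = pvD nums k t from by
        rw [← List.getD_eq_getElem?_getD, pvDList_getD nums k htm]]
      simp only [e2]
      by_cases h1 : (m : Int) - k ≤ (t : Int) <;>
        by_cases h2 : pvRecB nums k m t = true <;>
          by_cases h3 : pvD nums k m < pvD nums k t <;>
            simp [h1, h2, h3, not_le] <;> omega
    · -- the freshly appended index m
      have hq : ((decide (((m + 1 : Nat) : Int) - 1 - k ≤ ((m : Nat) : Int)) || decide (m = m + 1 - 1)) &&
          pvRecB nums k (m + 1) m) = true := by
        rw [Bool.and_eq_true, Bool.or_eq_true]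
        refine ⟨Or.inr (by simp), ?_⟩
        rw [pvRecB_iff]
        intro s hs hsm
        omega
      simp only [List.filter_cons, List.filter_nil, hq, if_pos]
  rw [hsplit, List.map_append]
  rfl

lemma foldB (nums : List Int) (k : Int) :
    ∀ m, m ≤ nums.length →
      ((PySem.List.enumerate (nums.take m) 0).foldl
        (fun (st : List Int × List Int) ix =>
          let dq1 := st.1.dropWhile (fun t => decide (t < ix.1 - k))
          let w : Int := match dq1 with
            | [] => 0
            | t :: _ => PySem.List.pyGetD st.2 t 0
          let cur := ix.2 + (if 0 < w then w else 0)
          let dq2 := pvPopBackWhile (fun t => decide (PySem.List.pyGetD st.2 t 0 ≤ cur)) dq1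
          (dq2 ++ [ix.1], st.2 ++ [cur]))
        ([], []))
      = ((pvDq nums k m).map (fun t : Nat => (t : Int)), pvDList nums k m) := by
  intro m hm
  induction m with
  | zero => simp [pvDq, pvDList, PySem.List.enumerate_nil]
  | succ m ih =>
    have hm2 : m < nums.length := by omega
    rw [List.take_succ, List.getElem?_eq_getElem hm2]
    rw [PySem.List.enumerate_append, List.foldl_append]
    rw [ih (by omega)]
    have hlen : (nums.take m).length = m := by simp [List.length_take]; omega
    rw [hlen]
    simp only [Option.toList_some, PySem.List.enumerate_cons, PySem.List.enumerate_nil,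
      List.foldl_cons, List.foldl_nil, zero_add]
    rw [show nums[m] = nums.getD m 0 from (List.getD_eq_getElem nums 0 hm2).symm]
    exact stepB nums k m hm2

-- ===== VERDICT (by name: the statement is the Claim_ definition above) =====
theorem constrainedSubsetSumTLE_spec : Claim_equal_constrainedSubsetSumTLE := by
  intro nums k _hdom _hpre
  unfold Spec_constrainedSubsetSumTLE
  unfold constrainedSubsetSumTLE constrainedSubsetSumTLE_alt
  dsimp only
  rw [outerA nums k nums.length le_rfl, List.drop_length, List.append_nil]
  rw [show PySem.List.enumerate nums 0 = PySem.List.enumerate (nums.take nums.length) 0 by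
    rw [List.take_length]]
  rw [foldB nums k nums.length le_rfl]
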